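-- pv_equiv track=rewrite | github.com/chess99/auto-duolingo | auto_duolingo/question_answer.py | map_options_to_bounds
-- ===== SOURCE A (Python) =====
-- def map_options_to_bounds(sorted_options, options_with_bounds):
--     options_with_bounds_dicts = [{'option': option, 'bounds': bounds,
--                                   'processed': False} for option, bounds in options_with_bounds]
--     bounds_to_click = []
--     for option in sorted_options:
--         for option_dict in options_with_bounds_dicts:
--             if option_dict['option'] == option and not option_dict['processed']:
--                 bounds_to_click.append(option_dict['bounds'])
--                 option_dict['processed'] = True  # Mark as processed
--                 break  # Move to the next word in sorted_options
--     return bounds_to_click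
-- ===== SOURCE B (Python) =====
-- def map_options_to_bounds(sorted_options, options_with_bounds):
--     # Build a FIFO queue of bounds per option once, then pop per sorted option.
--     queues = {}
--     for option, bounds in options_with_bounds:
--         queues.setdefault(option, []).append(bounds)
--     result = []
--     for option in sorted_options:
--         q = queues.get(option)
--         if q:
--             result.append(q.pop(0))
--     return result
-- ===== Notes on version B (the rewrite author's own statement) =====
-- stated objective: faster
-- what changed: Replaces the per-option linear scan over the processed-flag list with a dict mapping each option to a FIFO queue of its bounds, built once; each sorted option then pops the front of its queue.
import Mathlib
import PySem

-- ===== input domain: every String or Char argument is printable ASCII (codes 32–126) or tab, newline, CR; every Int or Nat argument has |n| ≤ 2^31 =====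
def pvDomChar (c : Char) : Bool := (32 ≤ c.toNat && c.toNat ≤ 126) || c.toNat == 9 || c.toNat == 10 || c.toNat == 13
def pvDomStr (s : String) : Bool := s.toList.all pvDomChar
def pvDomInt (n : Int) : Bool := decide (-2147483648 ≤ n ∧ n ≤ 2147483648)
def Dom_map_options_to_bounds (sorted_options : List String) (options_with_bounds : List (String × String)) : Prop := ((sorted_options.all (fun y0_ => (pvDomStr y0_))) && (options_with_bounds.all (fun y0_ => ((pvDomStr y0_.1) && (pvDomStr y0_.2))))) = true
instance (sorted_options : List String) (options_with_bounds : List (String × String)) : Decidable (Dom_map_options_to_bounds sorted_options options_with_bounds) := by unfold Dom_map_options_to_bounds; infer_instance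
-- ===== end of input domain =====

-- B replaces A's per-option linear scan over processed flags by a dict of per-option
-- FIFO queues built once (objective: faster; the measured label is the check's).

-- ===== PORT A =====
-- inner `for option_dict in options_with_bounds_dicts: … break` loop of A:
-- returns the appended bounds (if any) and the updated triples list.
def pvInnerA : List (String × String × Bool) → String → Option String × List (String × String × Bool)
  | [], _ => (none, [])
  | (o, b, p) :: rest, opt =>
      if o == opt && !p then (some b, (o, b, true) :: rest)
      else
        let r := pvInnerA rest opt
        (r.1, (o, b, p) :: r.2)

-- body of A's outer `for option in sorted_options` loop
def pvStepA (st : List (String × String × Bool) × List String) (opt : String) :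
    List (String × String × Bool) × List String :=
  let r := pvInnerA st.1 opt
  match r.1 with
  | some b => (r.2, st.2 ++ [b])
  | none => (r.2, st.2)

def map_options_to_bounds (sorted_options : List String) (options_with_bounds : List (String × String)) : List String :=
  let dicts := options_with_bounds.map (fun p => (p.1, p.2, false))
  (sorted_options.foldl pvStepA (dicts, [])).2

-- ===== PORT B =====
-- body of B's `for option in sorted_options` loop:
-- q = queues.get(option); if q: result.append(q.pop(0))
def pvStepB (st : PySem.Dict String (List String) × List String) (opt : String) :
    PySem.Dict String (List String) × List String :=
  match st.1.get? opt with
  | some (b :: rest) => (st.1.insert opt rest, st.2 ++ [b])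
  | _ => st

def map_options_to_bounds_alt (sorted_options : List String) (options_with_bounds : List (String × String)) : List String :=
  -- queues.setdefault(option, []).append(bounds)
  let queues := options_with_bounds.foldl (fun d p => d.modify p.1 [] (fun q => q ++ [p.2])) PySem.Dict.empty
  (sorted_options.foldl pvStepB (queues, [])).2

-- ===== PRECONDITION & SPEC =====
def Spec_map_options_to_bounds (sorted_options : List String) (options_with_bounds : List (String × String)) (out : List String) : Prop := out = map_options_to_bounds_alt sorted_options options_with_bounds
instance (sorted_options : List String) (options_with_bounds : List (String × String)) (out : List String) : Decidable (Spec_map_options_to_bounds sorted_options options_with_bounds out) := by unfold Spec_map_options_to_bounds; infer_instance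

-- ===== CLAIM (what is proved, stated in full; the proofs are below) =====
def Claim_equal_map_options_to_bounds : Prop := ∀ (sorted_options : List String) (options_with_bounds : List (String × String)), Dom_map_options_to_bounds sorted_options options_with_bounds → Spec_map_options_to_bounds sorted_options options_with_bounds (map_options_to_bounds sorted_options options_with_bounds)

-- ===== LEMMAS AND PROOFS =====

-- the pending (unprocessed) bounds for key k, in order
def pvPend (L : List (String × String × Bool)) (k : String) : List String :=
  L.filterMap (fun t => if t.1 == k && !t.2.2 then some t.2.1 else none)

theorem pvPend_cons (o b : String) (p : Bool) (rest : List (String × String × Bool)) (k : String) :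
    pvPend ((o, b, p) :: rest) k =
      if (o == k && !p) = true then b :: pvPend rest k else pvPend rest k := by
  by_cases hc : (o == k && !p) = true
  · have ho : o = k := beq_iff_eq.mp ((Bool.and_eq_true _ _).mp hc).1
    have hp : p = false := by simpa using ((Bool.and_eq_true _ _).mp hc).2
    subst ho hp
    simp [pvPend]
  · simp only [pvPend, List.filterMap_cons]
    simp [hc]

theorem pvInnerA_spec (L : List (String × String × Bool)) (opt : String) :
    (pvInnerA L opt).1 = (pvPend L opt).head? ∧
    pvPend (pvInnerA L opt).2 opt = (pvPend L opt).tail ∧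
    ∀ k, k ≠ opt → pvPend (pvInnerA L opt).2 k = pvPend L k := by
  induction L with
  | nil => exact ⟨rfl, rfl, fun _ _ => rfl⟩
  | cons t rest ih =>
    obtain ⟨o, b, p⟩ := t
    by_cases h : (o == opt && !p) = true
    · have ho : o = opt := beq_iff_eq.mp ((Bool.and_eq_true _ _).mp h).1
      have hp : p = false := by simpa using ((Bool.and_eq_true _ _).mp h).2
      subst ho hp
      have hA : pvInnerA ((o, b, false) :: rest) o = (some b, (o, b, true) :: rest) := by
        simp [pvInnerA]
      refine ⟨?_, ?_, ?_⟩
      · rw [hA, pvPend_cons]; simp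
      · rw [hA, pvPend_cons, pvPend_cons]; simp
      · intro k hk
        have hok : (o == k) = false := beq_eq_false_iff_ne.mpr (fun he => hk (he ▸ rfl))
        rw [hA, pvPend_cons, pvPend_cons]
        simp [hok]
    · have hA : pvInnerA ((o, b, p) :: rest) opt =
          ((pvInnerA rest opt).1, (o, b, p) :: (pvInnerA rest opt).2) := by
        simp [pvInnerA, h]
      refine ⟨?_, ?_, ?_⟩
      · rw [hA, pvPend_cons, if_neg h]; exact ih.1
      · rw [hA, pvPend_cons, if_neg h, pvPend_cons, if_neg h]; exact ih.2.1
      · intro k hk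
        rw [hA, pvPend_cons, pvPend_cons]
        by_cases hc : (o == k && !p) = true
        · simp [hc, ih.2.2 k hk]
        · simp [hc, ih.2.2 k hk]

-- invariant relating A's triples list to B's queue dict
def pvInv (L : List (String × String × Bool)) (d : PySem.Dict String (List String)) : Prop :=
  ∀ k, d.getD k [] = pvPend L k

theorem pvStep_eq (L : List (String × String × Bool)) (d : PySem.Dict String (List String))
    (acc : List String) (opt : String) (h : pvInv L d) :
    (pvStepA (L, acc) opt).2 = (pvStepB (d, acc) opt).2 ∧
    pvInv (pvStepA (L, acc) opt).1 (pvStepB (d, acc) opt).1 := by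
  obtain ⟨h1, h2, h3⟩ := pvInnerA_spec L opt
  cases hp : pvPend L opt with
  | nil =>
    have hA1 : (pvInnerA L opt).1 = none := by rw [h1, hp]; rfl
    have hgd : d.getD opt [] = [] := by rw [h opt, hp]
    have hB : pvStepB (d, acc) opt = (d, acc) := by
      rcases hq : d.get? opt with _ | q
      · simp [pvStepB, hq]
      · have hq2 : d.getD opt [] = q := by
          rw [PySem.Dict.getD_eq_get?_getD, hq]; rfl
        have : q = [] := by rw [← hq2, hgd]
        subst this; simp [pvStepB, hq]
    refine ⟨?_, ?_⟩
    · simp [pvStepA, hA1, hB]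
    · rw [hB]
      intro k
      by_cases hk : k = opt
      · subst hk
        simp only [pvStepA, hA1]
        rw [h2, hp, hgd]; rfl
      · simp only [pvStepA, hA1]
        rw [h3 k hk, h k]
  | cons b bs =>
    have hA1 : (pvInnerA L opt).1 = some b := by rw [h1, hp]; rfl
    have hgd : d.getD opt [] = b :: bs := by rw [h opt, hp]
    have hq : d.get? opt = some (b :: bs) := by
      rcases hq' : d.get? opt with _ | q
      · exfalso
        have h' : d.getD opt [] = [] := by
          rw [PySem.Dict.getD_eq_get?_getD, hq']; rfl
        rw [hgd] at h'; simp at h'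
      · have h' : d.getD opt [] = q := by
          rw [PySem.Dict.getD_eq_get?_getD, hq']; rfl
        rw [hgd] at h'; rw [← h']
    refine ⟨?_, ?_⟩
    · simp [pvStepA, hA1, pvStepB, hq]
    · intro k
      simp only [pvStepA, hA1, pvStepB, hq]
      rw [PySem.Dict.getD_insert]
      by_cases hk : k = opt
      · subst hk; rw [if_pos rfl, h2, hp]; rfl
      · rw [if_neg hk, h3 k hk, h k]

theorem pvPend_init (owb : List (String × String)) (k : String) :
    pvPend (owb.map (fun p => (p.1, p.2, false))) k =
      (owb.filter (fun p => p.1 == k)).map (fun p => p.2) := by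
  induction owb with
  | nil => rfl
  | cons q rest ih =>
    simp only [List.map_cons, List.filter_cons]
    rw [pvPend_cons]
    by_cases hc : (q.1 == k) = true
    · simp [hc, ih]
    · simp [hc, ih]

theorem pvFold_eq (so : List String) (L : List (String × String × Bool))
    (d : PySem.Dict String (List String)) (acc : List String) (h : pvInv L d) :
    (so.foldl pvStepA (L, acc)).2 = (so.foldl pvStepB (d, acc)).2 := by
  induction so generalizing L d acc with
  | nil => simp
  | cons x xs ih =>
    obtain ⟨h1, h2⟩ := pvStep_eq L d acc x h
    simp only [List.foldl_cons]
    have hr : (pvStepA (L, acc) x) = ((pvStepA (L, acc) x).1, (pvStepB (d, acc) x).2) := by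
      rw [← h1]
    rw [hr]
    have hr2 : (pvStepB (d, acc) x) = ((pvStepB (d, acc) x).1, (pvStepB (d, acc) x).2) := rfl
    rw [hr2]
    exact ih _ _ _ h2

-- ===== VERDICT (by name: the statement is the Claim_ definition above) =====
theorem map_options_to_bounds_spec : Claim_equal_map_options_to_bounds := by
  intro so owb _
  unfold Spec_map_options_to_bounds map_options_to_bounds map_options_to_bounds_alt
  apply pvFold_eq
  intro k
  rw [PySem.Dict.getD_foldl_modify_append, pvPend_init]
  rfl
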